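-- pv_equiv track=rewrite | github.com/junglewill/Sentiment-analysis-stock-prediction | big_issue.py | find_keyword_index
-- ===== SOURCE A (Python) =====
-- def find_keyword_index(keyword, keyword_list, source):
--     temp=[]
--     for i in range(len(source)):
--         if type(source[i])!=str:
--             source[i]=str(source[i])
--         for words in keyword_list:
--             if words in source[i]:
--                 temp.append(i)
--                 break
--     return temp
-- ===== SOURCE B (Python) =====
-- def find_keyword_index(keyword, keyword_list, source):
--     # keyword-outer traversal: collect matching indices in a set, then sort
--     hits = set()
--     for w in keyword_list:
--         for i, s in enumerate(source):
--             if w in str(s):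
--                 hits.add(i)
--     return sorted(hits)
-- ===== Notes on version B (the rewrite author's own statement) =====
-- stated objective: alternative
-- what changed: B swaps the loop nesting: it scans the sources once per keyword (keyword-outer), collects matching indices in a set, and returns them sorted, instead of A's source-outer scan with an inner break over the keywords appending indices in order.
import Mathlib
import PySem

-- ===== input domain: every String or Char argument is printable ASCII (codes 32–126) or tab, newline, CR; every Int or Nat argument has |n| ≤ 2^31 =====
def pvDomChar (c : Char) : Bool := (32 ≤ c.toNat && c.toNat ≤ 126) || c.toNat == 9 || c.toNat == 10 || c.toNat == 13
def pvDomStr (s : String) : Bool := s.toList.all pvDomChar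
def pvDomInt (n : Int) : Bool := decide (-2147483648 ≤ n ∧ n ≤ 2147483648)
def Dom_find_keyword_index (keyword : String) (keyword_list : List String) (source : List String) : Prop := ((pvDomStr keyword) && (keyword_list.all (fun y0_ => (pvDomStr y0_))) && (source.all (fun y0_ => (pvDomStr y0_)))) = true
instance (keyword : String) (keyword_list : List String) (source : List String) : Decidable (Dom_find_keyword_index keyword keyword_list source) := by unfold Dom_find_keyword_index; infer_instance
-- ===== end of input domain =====

-- B swaps the loop nesting (keyword-outer, set of hits, sorted at the end) — an alternative traversal,
-- same cost; return values proved equal (A's in-place str() coercion never fires on string inputs).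

-- ===== PORT A =====
-- inner 'for words in keyword_list: if words in s: …; break' — first match wins, ported as a structural scan
def kwHit : List String → String → Bool
  | [], _ => false
  | w :: ws, s => if PySem.Str.isIn w s then true else kwHit ws s

def find_keyword_index (keyword : String) (keyword_list : List String) (source : List String) : List Int :=
  (PySem.List.pyRange 0 (source.length : Int) 1).foldl
    (fun temp i =>
      if kwHit keyword_list (PySem.List.pyGetD source i "") then temp ++ [i] else temp)
    []

-- ===== PORT B =====
def find_keyword_index_alt (keyword : String) (keyword_list : List String) (source : List String) : List Int :=
  let hits : PySem.Set Int :=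
    keyword_list.foldl
      (fun hs w =>
        (PySem.List.enumerate source 0).foldl
          (fun hs2 p => if PySem.Str.isIn w p.2 then PySem.Set.add hs2 p.1 else hs2)
          hs)
      PySem.Set.empty
  PySem.List.sorted hits (fun x => x) false

-- ===== PRECONDITION & SPEC =====
def Spec_find_keyword_index (keyword : String) (keyword_list : List String) (source : List String) (out : List Int) : Prop := out = find_keyword_index_alt keyword keyword_list source
instance (keyword : String) (keyword_list : List String) (source : List String) (out : List Int) : Decidable (Spec_find_keyword_index keyword keyword_list source out) := by unfold Spec_find_keyword_index; infer_instance

-- ===== CLAIM (what is proved, stated in full; the proofs are below) =====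
def Claim_equal_find_keyword_index : Prop := ∀ (keyword : String) (keyword_list : List String) (source : List String), Dom_find_keyword_index keyword keyword_list source → Spec_find_keyword_index keyword keyword_list source (find_keyword_index keyword keyword_list source)

-- ===== LEMMAS AND PROOFS =====

theorem kwHit_eq_any (kl : List String) (s : String) :
    kwHit kl s = kl.any (fun w => PySem.Str.isIn w s) := by
  induction kl with
  | nil => rfl
  | cons w ws ih =>
      unfold kwHit
      by_cases h : PySem.Str.isIn w s = true <;> simp [h, ih]

theorem innerFold_mem (w : String) (l : List (Int × String)) (hs : List Int) (i : Int) :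
    (i ∈ l.foldl (fun hs2 p => if PySem.Str.isIn w p.2 then PySem.Set.add hs2 p.1 else hs2) hs)
      ↔ i ∈ hs ∨ ∃ p ∈ l, PySem.Str.isIn w p.2 = true ∧ p.1 = i := by
  induction l generalizing hs with
  | nil => simp
  | cons p l ih =>
      simp only [List.foldl_cons, ih, List.mem_cons]
      by_cases h : PySem.Str.isIn w p.2 = true
      · rw [if_pos h]
        simp only [PySem.Set.mem_add]
        constructor
        · rintro (⟨hi | rfl⟩ | ⟨q, hq, hin, hiq⟩)
          · exact Or.inl hi
          · exact Or.inr ⟨p, Or.inl rfl, h, rfl⟩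
          · exact Or.inr ⟨q, Or.inr hq, hin, hiq⟩
        · rintro (hi | ⟨q, (rfl | hq), hin, hiq⟩)
          · exact Or.inl (Or.inl hi)
          · exact Or.inl (Or.inr hiq.symm)
          · exact Or.inr ⟨q, hq, hin, hiq⟩
      · rw [if_neg h]
        constructor
        · rintro (hi | ⟨q, hq, hin, hiq⟩)
          · exact Or.inl hi
          · exact Or.inr ⟨q, Or.inr hq, hin, hiq⟩
        · rintro (hi | ⟨q, (rfl | hq), hin, hiq⟩)
          · exact Or.inl hi
          · exact absurd hin h
          · exact Or.inr ⟨q, hq, hin, hiq⟩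

theorem innerFold_nodup (w : String) (l : List (Int × String)) (hs : List Int) (h : hs.Nodup) :
    (l.foldl (fun hs2 p => if PySem.Str.isIn w p.2 then PySem.Set.add hs2 p.1 else hs2) hs).Nodup := by
  induction l generalizing hs with
  | nil => exact h
  | cons p l ih =>
      simp only [List.foldl_cons]
      by_cases hp : PySem.Str.isIn w p.2 = true
      · simp only [hp, if_true]; exact ih _ (PySem.Set.nodup_add _ _ h)
      · rw [if_neg hp]; exact ih _ h

theorem outerFold_mem (kl : List String) (src : List String) (hs : List Int) (i : Int) :
    (i ∈ kl.foldl (fun hs w => (PySem.List.enumerate src 0).foldl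
        (fun hs2 p => if PySem.Str.isIn w p.2 then PySem.Set.add hs2 p.1 else hs2) hs) hs)
      ↔ i ∈ hs ∨ ∃ w ∈ kl, ∃ p ∈ PySem.List.enumerate src 0, PySem.Str.isIn w p.2 = true ∧ p.1 = i := by
  induction kl generalizing hs with
  | nil => simp
  | cons w kl ih =>
      simp only [List.foldl_cons, ih, innerFold_mem, List.mem_cons]
      constructor
      · rintro ((hi | ⟨p, hp, hin, hiq⟩) | ⟨w', hw', hrest⟩)
        · exact Or.inl hi
        · exact Or.inr ⟨w, Or.inl rfl, p, hp, hin, hiq⟩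
        · exact Or.inr ⟨w', Or.inr hw', hrest⟩
      · rintro (hi | ⟨w', (rfl | hw'), hrest⟩)
        · exact Or.inl (Or.inl hi)
        · exact Or.inl (Or.inr hrest)
        · exact Or.inr ⟨w', hw', hrest⟩

theorem outerFold_nodup (kl : List String) (src : List String) (hs : List Int) (h : hs.Nodup) :
    (kl.foldl (fun hs w => (PySem.List.enumerate src 0).foldl
        (fun hs2 p => if PySem.Str.isIn w p.2 then PySem.Set.add hs2 p.1 else hs2) hs) hs).Nodup := by
  induction kl generalizing hs with
  | nil => exact h
  | cons w kl ih => exact ih _ (innerFold_nodup _ _ _ h)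

-- A's result is the ordered filter of range(len(source))
theorem portA_eq_filter (kw : String) (kl : List String) (src : List String) :
    find_keyword_index kw kl src
      = (PySem.List.pyRange 0 (src.length : Int) 1).filter
          (fun i => kwHit kl (PySem.List.pyGetD src i "")) := by
  unfold find_keyword_index
  simpa using PySem.List.foldl_append_if_eq_filter
    (p := fun i => kwHit kl (PySem.List.pyGetD src i ""))
    (l := PySem.List.pyRange 0 (src.length : Int) 1) (acc := [])

-- ===== VERDICT (by name: the statement is the Claim_ definition above) =====
theorem find_keyword_index_spec : Claim_equal_find_keyword_index := by
  intro kw kl src _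
  unfold Spec_find_keyword_index find_keyword_index_alt
  simp only []
  rw [portA_eq_filter]
  set L := (PySem.List.pyRange 0 (src.length : Int) 1).filter
      (fun i => kwHit kl (PySem.List.pyGetD src i "")) with hL
  have hLpw : L.Pairwise (· < ·) :=
    (PySem.List.pairwise_lt_pyRange_one 0 (src.length : Int)).filter _
  have hLnd : L.Nodup := hLpw.imp (fun h => ne_of_lt h)
  have hhitsnd : (kl.foldl (fun hs w => (PySem.List.enumerate src 0).foldl
      (fun hs2 p => if PySem.Str.isIn w p.2 then PySem.Set.add hs2 p.1 else hs2) hs)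
      PySem.Set.empty).Nodup := outerFold_nodup kl src _ (by simp [PySem.Set.empty])
  have hmem : ∀ i : Int, i ∈ (kl.foldl (fun hs w => (PySem.List.enumerate src 0).foldl
      (fun hs2 p => if PySem.Str.isIn w p.2 then PySem.Set.add hs2 p.1 else hs2) hs)
      PySem.Set.empty) ↔ i ∈ L := by
    intro i
    rw [outerFold_mem]
    simp only [hL, List.mem_filter, PySem.List.mem_pyRange_one, kwHit_eq_any,
      List.any_eq_true, PySem.Set.empty, List.not_mem_nil, false_or,
      PySem.List.mem_enumerate_iff]
    constructor
    · rintro ⟨w, hw, p, ⟨k, hk, rfl⟩, hin, hi⟩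
      simp only [zero_add] at hi
      subst hi
      refine ⟨⟨by omega, by omega⟩, w, hw, ?_⟩
      simpa [PySem.List.pyGetD_natCast, List.getD_eq_getElem?_getD,
        List.getElem?_eq_getElem hk] using hin
    · rintro ⟨⟨h0, hn⟩, w, hw, hin⟩
      obtain ⟨k, rfl⟩ : ∃ k : Nat, i = (k : Int) := ⟨i.toNat, (Int.toNat_of_nonneg h0).symm⟩
      have hk : k < src.length := by omega
      refine ⟨w, hw, ((k : Int), src[k]), ⟨k, hk, by simp⟩, ?_, rfl⟩
      simpa [PySem.List.pyGetD_natCast, List.getD_eq_getElem?_getD,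
        List.getElem?_eq_getElem hk] using hin
  have hperm : L.Perm (kl.foldl (fun hs w => (PySem.List.enumerate src 0).foldl
      (fun hs2 p => if PySem.Str.isIn w p.2 then PySem.Set.add hs2 p.1 else hs2) hs)
      PySem.Set.empty) := by
    rw [List.perm_ext_iff_of_nodup hLnd hhitsnd]
    intro a; exact (hmem a).symm
  exact (PySem.List.sorted_eq_of_perm_of_pairwise_lt _ _ (fun x => x) hperm (by simpa using hLpw)).symm
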